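-- pv_equiv track=rewrite | github.com/v0lta/Jax-Wavelet-Toolbox | src/jaxwt/packets.py | _get_graycode_order
-- ===== SOURCE A (Python) =====
-- from typing import TYPE_CHECKING, List, Optional, Union
--
-- def _get_graycode_order(level: int, x: str = "a", y: str = "d") -> List[str]:
--     graycode_order = [x, y]
--     for _ in range(level - 1):
--         graycode_order = [x + path for path in graycode_order] + [
--             y + path for path in graycode_order[::-1]
--         ]
--     if level == 0:
--         return [""]
--     else:
--         return graycode_order
-- ===== SOURCE B (Python) =====
-- from typing import List
--
--
-- def _get_graycode_order(level: int, x: str = "a", y: str = "d") -> List[str]: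
--     # Entry i of the reflected Gray order is read off the bits of
--     # g = i ^ (i >> 1), most significant bit first (set bit -> y, clear -> x).
--     paths = []
--     for i in range(2 ** level):
--         g = i ^ (i >> 1)
--         paths.append("".join(y if (g >> b) & 1 else x for b in range(level - 1, -1, -1)))
--     return paths
-- ===== Notes on version B (the rewrite author's own statement) =====
-- stated objective: alternative
-- what changed: Replaces A's iterative prepend-and-reflect list doubling with a closed-form computation: each of the 2^level paths is built directly from its index via the reflected Gray code g = i ^ (i >> 1), reading bits MSB-first; Pre_ excludes negative level, where A's returned [x, y] is leftover loop-initialisation state and B's range(2**level) raises TypeError.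
-- outside the precondition, e.g. on _get_graycode_order(-1, 'a', 'd'): A returns ['a', 'd'], B raises TypeError
import Mathlib
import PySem

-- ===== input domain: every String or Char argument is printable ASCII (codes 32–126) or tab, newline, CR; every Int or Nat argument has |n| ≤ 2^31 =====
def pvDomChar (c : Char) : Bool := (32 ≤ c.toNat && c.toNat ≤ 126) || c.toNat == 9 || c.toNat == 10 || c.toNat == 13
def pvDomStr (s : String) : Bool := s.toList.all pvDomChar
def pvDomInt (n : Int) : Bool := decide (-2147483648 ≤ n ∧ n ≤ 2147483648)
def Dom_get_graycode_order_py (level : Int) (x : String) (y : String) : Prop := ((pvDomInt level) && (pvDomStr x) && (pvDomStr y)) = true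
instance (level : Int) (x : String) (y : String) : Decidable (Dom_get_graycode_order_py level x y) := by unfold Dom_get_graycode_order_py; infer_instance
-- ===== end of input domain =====

-- B replaces A's iterative prepend-and-reflect list doubling by the closed-form reflected
-- Gray code (path i read off the bits of i ^ (i >> 1), MSB first); same return value on
-- level ≥ 0; B raises on negative level (excluded by Pre_).

-- ===== PORT A =====
-- Literal port of A: graycode_order = [x, y]; for _ in range(level - 1): prepend/reflect;
-- graycode_order[::-1] is PySem.List.slice? … (-1) (never none for step -1, so getD []).
def get_graycode_order_py (level : Int) (x : String) (y : String) : List String :=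
  let graycode_order : List String :=
    (PySem.List.pyRange 0 (level - 1) 1).foldl
      (fun graycode_order _ =>
        graycode_order.map (fun path => x ++ path) ++
          ((PySem.List.slice? graycode_order none none (-1)).getD []).map (fun path => y ++ path))
      [x, y]
  if level == 0 then [""] else graycode_order

-- ===== PORT B =====
-- "".join(y if (g >> b) & 1 else x for b in range(level - 1, -1, -1)) from Source B; on the
-- admitted domain (level ≥ 0) both Python ranges run over non-negative ints only, so they
-- are transcribed as List.range over Nat.
def grayWord (x y : String) (lv : Nat) (g : Nat) : String :=
  String.join ((List.range lv).reverse.map (fun b => if (g >>> b) &&& 1 == 1 then y else x))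

def get_graycode_order_py_alt (level : Int) (x : String) (y : String) : List String :=
  (List.range (2 ^ level.toNat)).map (fun i => grayWord x y level.toNat (i ^^^ (i >>> 1)))

-- ===== PRECONDITION & SPEC =====
-- Pre_ excludes level < 0: there A's [x, y] is the untouched loop-initialisation value
-- (the loop never runs), while B's range(2**level) raises TypeError on the float 2**level.
def Pre_get_graycode_order_py (level : Int) (x : String) (y : String) : Prop := 0 ≤ level
instance (level : Int) (x : String) (y : String) : Decidable (Pre_get_graycode_order_py level x y) := by unfold Pre_get_graycode_order_py; infer_instance

def pvWitness_get_graycode_order_py : Int × String × String := (2, "a", "d")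

def Spec_get_graycode_order_py (level : Int) (x : String) (y : String) (out : List String) : Prop := out = get_graycode_order_py_alt level x y
instance (level : Int) (x : String) (y : String) (out : List String) : Decidable (Spec_get_graycode_order_py level x y out) := by unfold Spec_get_graycode_order_py; infer_instance

-- ===== CLAIM (what is proved, stated in full; the proofs are below) =====
def Claim_equal_get_graycode_order_py : Prop := ∀ (level : Int) (x : String) (y : String), Dom_get_graycode_order_py level x y → Pre_get_graycode_order_py level x y → Spec_get_graycode_order_py level x y (get_graycode_order_py level x y)

-- ===== LEMMAS AND PROOFS =====

-- A's loop body, as one function of the list state.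
def grayStep (x y : String) (l : List String) : List String :=
  l.map (fun path => x ++ path) ++ l.reverse.map (fun path => y ++ path)

-- B's list at a given (non-negative) level.
def grayList (x y : String) (n : Nat) : List String :=
  (List.range (2 ^ n)).map (fun i => grayWord x y n (i ^^^ (i >>> 1)))

theorem my_foldl_append (l : List String) (a b : String) :
    l.foldl (fun r s => r ++ s) (a ++ b) = a ++ l.foldl (fun r s => r ++ s) b := by
  induction l generalizing b with
  | nil => simp
  | cons h t ih => simpa [String.append_assoc] using ih (b ++ h)

theorem my_join_cons (s : String) (l : List String) :
    String.join (s :: l) = s ++ String.join l := by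
  show List.foldl _ ("" ++ s) l = _
  rw [show ("" ++ s) = (s ++ "") by simp, my_foldl_append]
  rfl

theorem my_bit_cond (g b : Nat) : ((g >>> b) &&& 1 == 1) = g.testBit b := by
  simp [Nat.testBit]

theorem grayWord_succ (x y : String) (n g : Nat) :
    grayWord x y (n + 1) g = (if g.testBit n then y else x) ++ grayWord x y n g := by
  simp [grayWord, List.range_succ, my_join_cons, Nat.testBit]

theorem grayWord_congr (x y : String) (n : Nat) {g g' : Nat}
    (h : ∀ b < n, g.testBit b = g'.testBit b) : grayWord x y n g = grayWord x y n g' := by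
  unfold grayWord
  congr 1
  refine List.map_congr_left (fun b hb => ?_)
  have hbn : b < n := by simpa using List.mem_range.mp (List.mem_reverse.mp hb)
  rw [my_bit_cond, my_bit_cond, h b hbn]

-- complement: if j + m + 1 = 2^n then m's first n bits are j's, flipped
theorem my_compl_testBit : ∀ (n j m : Nat), j + m + 1 = 2 ^ n →
    ∀ b < n, m.testBit b = !j.testBit b := by
  intro n
  induction n with
  | zero => intro j m _ b hb; omega
  | succ n ih =>
    intro j m hsum b hb
    have hpow : 2 ^ (n + 1) = 2 * 2 ^ n := by ring
    cases b with
    | zero =>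
      have : j % 2 + m % 2 = 1 := by omega
      rcases Nat.mod_two_eq_zero_or_one j with h | h <;>
        simp [Nat.testBit_zero, h] <;> omega
    | succ b =>
      rw [Nat.testBit_succ, Nat.testBit_succ]
      exact ih (j / 2) (m / 2) (by omega) b (by omega)

theorem gray_xor_bit (m b : Nat) :
    (m ^^^ (m >>> 1)).testBit b = (m.testBit b ^^ m.testBit (b + 1)) := by
  rw [Nat.testBit_xor, Nat.testBit_shiftRight, Nat.add_comm 1 b]

theorem gray_lt (n m : Nat) (h : m < 2 ^ n) : m ^^^ (m >>> 1) < 2 ^ n :=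
  Nat.xor_lt_two_pow h (lt_of_le_of_lt (Nat.shiftRight_le m 1) h)

-- the reflection identity of the Gray code
theorem gray_reflect (n j m : Nat) (hj : j < 2 ^ n) (hm : m < 2 ^ n)
    (hsum : j + m + 1 = 2 ^ n) :
    (2 ^ n + j) ^^^ ((2 ^ n + j) >>> 1) = 2 ^ n + (m ^^^ (m >>> 1)) := by
  have hgm : m ^^^ (m >>> 1) < 2 ^ n := gray_lt n m hm
  have hC := my_compl_testBit n j m hsum
  refine Nat.eq_of_testBit_eq fun b => ?_
  rcases lt_trichotomy b n with hbn | hbn | hbn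
  · -- b < n
    rw [gray_xor_bit, Nat.testBit_two_pow_add_gt hbn,
        Nat.testBit_two_pow_add_gt hbn]
    rcases Nat.lt_or_ge (b + 1) n with hb1 | hb1
    · rw [Nat.testBit_two_pow_add_gt hb1, gray_xor_bit,
          hC b hbn, hC (b + 1) hb1]
      cases j.testBit b <;> cases j.testBit (b + 1) <;> rfl
    · have hbe : b + 1 = n := by omega
      subst hbe
      rw [Nat.testBit_two_pow_add_eq, Nat.testBit_lt_two_pow hj,
          gray_xor_bit, hC b (by omega), Nat.testBit_lt_two_pow hm]
      cases j.testBit b <;> rfl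
  · -- b = n
    subst hbn
    have h2 : 2 ^ b + j < 2 ^ (b + 1) := by
      have : 2 ^ (b + 1) = 2 * 2 ^ b := by ring
      omega
    rw [gray_xor_bit, Nat.testBit_two_pow_add_eq, Nat.testBit_lt_two_pow hj,
        Nat.testBit_lt_two_pow h2, Nat.testBit_two_pow_add_eq,
        Nat.testBit_lt_two_pow hgm]
    rfl
  · -- b > n
    have hle : 2 ^ (n + 1) ≤ 2 ^ b := Nat.pow_le_pow_right (by omega) (by omega)
    have h2 : 2 ^ (n + 1) = 2 * 2 ^ n := by ring
    have hL : (2 ^ n + j) ^^^ ((2 ^ n + j) >>> 1) < 2 ^ b :=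
      lt_of_lt_of_le (gray_lt (n + 1) _ (by omega)) hle
    rw [Nat.testBit_lt_two_pow hL, Nat.testBit_lt_two_pow (by omega)]

theorem my_reverse_map_range {α : Type} (N : Nat) (f : Nat → α) :
    ((List.range N).map f).reverse = (List.range N).map (fun j => f (N - 1 - j)) := by
  apply List.ext_getElem (by simp)
  intro i h1 h2
  simp [List.getElem_reverse]

-- one doubling step of A advances B's closed form by one level
theorem grayStep_grayList (x y : String) (n : Nat) :
    grayStep x y (grayList x y n) = grayList x y (n + 1) := by
  unfold grayStep grayList
  rw [my_reverse_map_range]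
  rw [show (2 : Nat) ^ (n + 1) = 2 ^ n + 2 ^ n by ring, List.range_add]
  rw [List.map_append, List.map_map, List.map_map, List.map_map]
  congr 1
  · -- first half: prefix x, top bit clear
    refine List.map_congr_left fun i hi => ?_
    have hi' : i < 2 ^ n := List.mem_range.mp hi
    have : (i ^^^ (i >>> 1)).testBit n = false :=
      Nat.testBit_lt_two_pow (gray_lt n i hi')
    simp [Function.comp, grayWord_succ, this]
  · -- second half: prefix y, reflected order
    refine List.map_congr_left fun j hj => ?_
    have hj' : j < 2 ^ n := List.mem_range.mp hj
    have hm : 2 ^ n - 1 - j < 2 ^ n := by omega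
    have hrefl := gray_reflect n j (2 ^ n - 1 - j) hj' hm (by omega)
    have hgm : (2 ^ n - 1 - j) ^^^ ((2 ^ n - 1 - j) >>> 1) < 2 ^ n :=
      gray_lt n _ hm
    simp only [Function.comp, hrefl, grayWord_succ]
    rw [Nat.testBit_two_pow_add_eq, Nat.testBit_lt_two_pow hgm]
    simp only [Bool.not_false]
    congr 1
    exact grayWord_congr x y n fun b hb => (Nat.testBit_two_pow_add_gt hb _).symm

theorem grayList_one (x y : String) : grayList x y 1 = [x, y] := by
  simp [grayList, List.range_succ, grayWord, String.join, List.range_succ]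

theorem my_foldl_const {α β : Type} (l : List α) (f : β → β) (s : β) :
    l.foldl (fun s _ => f s) s = f^[l.length] s := by
  induction l generalizing s with
  | nil => rfl
  | cons h t ih => simp [List.foldl, ih, Function.iterate_succ_apply]

theorem grayIter (x y : String) (k : Nat) :
    (grayStep x y)^[k] [x, y] = grayList x y (k + 1) := by
  induction k with
  | zero => simpa using (grayList_one x y).symm
  | succ k ih => rw [Function.iterate_succ_apply', ih, grayStep_grayList]

theorem alt_eq_grayList (level : Int) (x y : String) :
    get_graycode_order_py_alt level x y = grayList x y level.toNat := rfl

-- ===== VERDICT (by name: the statement is the Claim_ definition above) =====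
theorem get_graycode_order_py_spec : Claim_equal_get_graycode_order_py := by
  intro level x y _ hpre
  unfold Pre_get_graycode_order_py at hpre
  unfold Spec_get_graycode_order_py get_graycode_order_py
  rw [alt_eq_grayList]
  simp only [PySem.List.slice?_none_none_neg_one, Option.getD_some]
  by_cases h0 : level = 0
  · subst h0
    simp [grayList, grayWord]
    rfl
  · have hpos : 0 < level := by omega
    have hfold : (PySem.List.pyRange 0 (level - 1) 1).foldl
        (fun go _ => go.map (fun path => x ++ path) ++ go.reverse.map (fun path => y ++ path))
        [x, y] = (grayStep x y)^[(PySem.List.pyRange 0 (level - 1) 1).length] [x, y] :=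
      my_foldl_const _ _ _
    rw [show (level == 0) = false by simp [h0]]
    simp only [Bool.false_eq_true, if_false]
    rw [hfold, PySem.List.length_pyRange_one, grayIter]
    have : (level - 1 - 0).toNat + 1 = level.toNat := by omega
    rw [this]
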